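-- pv_equiv track=rewrite | github.com/hwayne/tutor | errors.py | negerror
-- ===== SOURCE A (Python) =====
-- from copy import copy
--
-- def negerror(problem):
--     newproblems = []
--     for pos, elem in enumerate(problem):
--         if elem == "NEG":
--             temp = copy(problem)
--             temp.pop(pos)
--             newproblems.append((temp,"dropped negative sign"))
--             newproblems += negerror(temp) #Recursive, get all space
--     return newproblems
-- ===== SOURCE B (Python) =====
-- def negerror(problem):
--     # Same pre-order enumeration as the recursive version, but with an
--     # explicit stack instead of the call stack.
--     def children(p):
--         return [p[:i] + p[i + 1:] for i, e in enumerate(p) if e == "NEG"]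
--
--     result = []
--     stack = list(reversed(children(problem)))
--     while stack:
--         node = stack.pop()
--         result.append((node, "dropped negative sign"))
--         stack.extend(reversed(children(node)))
--     return result
-- ===== Notes on version B (the rewrite author's own statement) =====
-- stated objective: alternative
-- what changed: Replaces the recursive pre-order enumeration (call stack, list copy + pop per node) with an iterative explicit-stack DFS over a children() helper built from slices.
import Mathlib
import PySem

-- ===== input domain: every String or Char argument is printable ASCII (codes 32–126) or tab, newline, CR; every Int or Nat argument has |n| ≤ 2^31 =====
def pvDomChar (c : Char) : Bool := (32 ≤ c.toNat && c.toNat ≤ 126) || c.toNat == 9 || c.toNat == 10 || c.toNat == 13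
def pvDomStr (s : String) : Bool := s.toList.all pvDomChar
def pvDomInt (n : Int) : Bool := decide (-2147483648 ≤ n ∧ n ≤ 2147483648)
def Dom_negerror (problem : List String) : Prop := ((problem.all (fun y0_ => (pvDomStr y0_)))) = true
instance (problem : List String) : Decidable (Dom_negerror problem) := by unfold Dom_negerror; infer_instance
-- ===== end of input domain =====

-- B replaces A's recursion over the call stack with an iterative explicit-stack pre-order DFS (objective: alternative).

-- ===== PORT A =====
-- A: for each position holding "NEG", drop it, record it, and recurse on the shortened list.
mutual
def negerror (problem : List String) : List (List String × String) :=
  negerrorLoop problem (PySem.List.enumerate problem) []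
termination_by (problem.length, 1, 0)

-- the 'for pos, elem in enumerate(problem)' loop, accumulator acc = newproblems
def negerrorLoop (problem : List String) (todo : List (Int × String))
    (acc : List (List String × String)) : List (List String × String) :=
  match todo with
  | [] => acc
  | (pos, elem) :: rest =>
    if elem = "NEG" then
      -- temp = copy(problem); temp.pop(pos)  (pos comes from enumerate so it is always in
      -- range; the none branch is an unreachable totality guard)
      match h : PySem.List.pop? problem pos with
      | some r =>
          negerrorLoop problem rest ((acc ++ [(r.2, "dropped negative sign")]) ++ negerror r.2)
      | none => acc
    else negerrorLoop problem rest acc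
termination_by (problem.length, 0, todo.length)
decreasing_by
  · simp only [Prod.lex_def]
    have := PySem.List.length_of_pop?_eq_some problem h
    omega
  · simp [Prod.lex_def]
  · simp [Prod.lex_def]
end

-- ===== PORT B =====
-- children(p) = [p[:i] + p[i+1:] for i, e in enumerate(p) if e == "NEG"]
def childrenB (p : List String) : List (List String) :=
  (PySem.List.enumerate p).filterMap (fun ie =>
    if ie.2 = "NEG" then
      some (PySem.List.slice p none (some ie.1) ++ PySem.List.slice p (some (ie.1 + 1)) none)
    else none)

-- every child is exactly one element shorter (used for the stack loop's termination)
theorem childrenB_len_lt {p c : List String} (hc : c ∈ childrenB p) : c.length + 1 = p.length := by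
  unfold childrenB at hc
  rcases List.mem_filterMap.1 hc with ⟨⟨i, e⟩, hmem, hif⟩
  rcases (PySem.List.mem_enumerate_iff _ _ _).1 hmem with ⟨k, hk, hpr⟩
  simp only at hif
  split_ifs at hif with he
  · cases hpr
    simp only [Option.some.injEq] at hif
    subst hif
    have h1 : PySem.List.slice p none (some ((0:Int) + (k:Nat))) = p.take k := by
      rw [show ((0:Int) + (k:Nat)) = ((k:Nat):Int) by omega]
      exact PySem.List.slice_to_natCast p k
    have h2 : PySem.List.slice p (some ((0:Int) + (k:Nat) + 1)) none = p.drop (k+1) := by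
      rw [show ((0:Int) + (k:Nat) + 1) = (((k+1:Nat)):Int) by omega]
      exact PySem.List.slice_from_natCast p (k+1)
    rw [h1, h2]
    simp only [List.length_append, List.length_take, List.length_drop]
    omega

theorem childrenB_count_le' (p : List String) : (childrenB p).length ≤ p.length := by
  unfold childrenB
  calc ((PySem.List.enumerate p).filterMap _).length
      ≤ (PySem.List.enumerate p).length := List.length_filterMap_le _ _
    _ = p.length := PySem.List.length_enumerate p 0

-- weight for the stack-loop termination measure
def pvWeight (stack : List (List String)) : Nat :=
  (stack.map (fun n => Nat.factorial (n.length + 1))).sum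

theorem pvWeight_children_lt (node : List String) :
    pvWeight (childrenB node) < Nat.factorial (node.length + 1) := by
  have hbound : pvWeight (childrenB node)
      ≤ (childrenB node).length * Nat.factorial node.length := by
    unfold pvWeight
    have := List.sum_le_card_nsmul ((childrenB node).map (fun n => Nat.factorial (n.length + 1)))
      (Nat.factorial node.length) ?_
    · simpa [smul_eq_mul] using this
    · intro x hx
      rcases List.mem_map.1 hx with ⟨c, hc, rfl⟩
      rw [childrenB_len_lt hc]
  have hcnt := childrenB_count_le' node
  have hfpos : 0 < Nat.factorial node.length := Nat.factorial_pos _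
  have : (childrenB node).length * Nat.factorial node.length
      ≤ node.length * Nat.factorial node.length := Nat.mul_le_mul_right _ hcnt
  have hlt : node.length * Nat.factorial node.length < Nat.factorial (node.length + 1) := by
    rw [Nat.factorial_succ]
    exact (Nat.mul_lt_mul_right hfpos).2 (Nat.lt_succ_self _)
  omega

-- stack is held top-first (the reverse of the Python list): pop() = take the head,
-- stack.extend(reversed(children(node))) = prepend children(node) in order.
def negerrorStack (stack : List (List String)) (result : List (List String × String)) :
    List (List String × String) :=
  match stack with
  | [] => result
  | node :: rest =>
      negerrorStack (childrenB node ++ rest) (result ++ [(node, "dropped negative sign")])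
termination_by pvWeight stack
decreasing_by
  unfold pvWeight
  simp only [List.map_append, List.sum_append, List.map_cons, List.sum_cons]
  have := pvWeight_children_lt node
  unfold pvWeight at this
  omega

def negerror_alt (problem : List String) : List (List String × String) :=
  -- stack = list(reversed(children(problem))): in top-first form that is childrenB problem
  negerrorStack (childrenB problem) []

-- ===== PRECONDITION & SPEC =====
def Spec_negerror (problem : List String) (out : List (List String × String)) : Prop := out = negerror_alt problem
instance (problem : List String) (out : List (List String × String)) : Decidable (Spec_negerror problem out) := by unfold Spec_negerror; infer_instance

-- ===== CLAIM (what is proved, stated in full; the proofs are below) =====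
def Claim_equal_negerror : Prop := ∀ (problem : List String), Dom_negerror problem → Spec_negerror problem (negerror problem)

-- ===== LEMMAS AND PROOFS =====

-- the pre-order DFS both programs compute, as a specification
def pvDfs (node : List String) : List (List String × String) :=
  (node, "dropped negative sign") :: (childrenB node).attach.flatMap (fun c => pvDfs c.1)
termination_by node.length
decreasing_by
  have := childrenB_len_lt c.2
  omega

theorem pvDfs_eq (node : List String) :
    pvDfs node = (node, "dropped negative sign") :: (childrenB node).flatMap pvDfs := by
  rw [pvDfs]
  congr 1
  conv_rhs => rw [← List.attach_map_subtype_val (childrenB node)]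
  rw [List.flatMap_map]

theorem negerrorStack_eq (stack : List (List String)) (result : List (List String × String)) :
    negerrorStack stack result = result ++ stack.flatMap pvDfs := by
  induction stack, result using negerrorStack.induct with
  | case1 result => simp [negerrorStack]
  | case2 result node rest ih =>
      rw [negerrorStack, ih, List.flatMap_cons, pvDfs_eq node]
      simp [List.flatMap_append, List.append_assoc]

theorem negerrorLoop_cons_neg (p : List String) (pos : Int) (rest : List (Int × String))
    (acc : List (List String × String)) (r : String × List String)
    (hpop : PySem.List.pop? p pos = some r) :
    negerrorLoop p ((pos, "NEG") :: rest) acc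
      = negerrorLoop p rest ((acc ++ [(r.2, "dropped negative sign")]) ++ negerror r.2) := by
  rw [negerrorLoop.eq_def]
  simp only [if_true]
  split
  · next r' hr' => rw [hpop] at hr'; cases hr'; rfl
  · next hr' => rw [hpop] at hr'; cases hr'

theorem negerrorLoop_cons_other (p : List String) (pos : Int) (elem : String)
    (rest : List (Int × String)) (acc : List (List String × String)) (hne : elem ≠ "NEG") :
    negerrorLoop p ((pos, elem) :: rest) acc = negerrorLoop p rest acc := by
  rw [negerrorLoop.eq_def]
  simp only [hne, if_false]

theorem negerrorLoop_eq (p : List String)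
    (IH : ∀ q : List String, q.length < p.length → negerror q = (childrenB q).flatMap pvDfs)
    (todo : List (Int × String)) (acc : List (List String × String))
    (hsub : ∀ pr ∈ todo, pr ∈ PySem.List.enumerate p 0) :
    negerrorLoop p todo acc
      = acc ++ (todo.filterMap (fun ie =>
          if ie.2 = "NEG" then
            some (PySem.List.slice p none (some ie.1) ++ PySem.List.slice p (some (ie.1 + 1)) none)
          else none)).flatMap pvDfs := by
  induction todo generalizing acc with
  | nil => rw [negerrorLoop]; simp
  | cons hd rest ih =>
      obtain ⟨pos, elem⟩ := hd
      have hmem := hsub (pos, elem) (List.mem_cons_self ..)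
      rcases (PySem.List.mem_enumerate_iff _ _ _).1 hmem with ⟨k, hk, hpr⟩
      have hpos : pos = ((k:Nat):Int) := by
        have := congrArg Prod.fst hpr; simpa using this
      have helem : elem = p[k] := by
        have := congrArg Prod.snd hpr; simpa using this
      by_cases hne : elem = "NEG"
      · subst hne
        have hpop : PySem.List.pop? p pos = some (p[k], p.eraseIdx k) := by
          rw [hpos]; exact PySem.List.pop?_natCast p k hk
        have hchild : PySem.List.slice p none (some pos)
            ++ PySem.List.slice p (some (pos + 1)) none = p.eraseIdx k := by
          rw [hpos, PySem.List.slice_to_natCast,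
            show ((k:Nat):Int) + 1 = (((k+1:Nat)):Int) by omega,
            PySem.List.slice_from_natCast, List.eraseIdx_eq_take_drop_succ]
        have hlen : (p.eraseIdx k).length < p.length := by
          rw [List.length_eraseIdx_of_lt hk]; omega
        rw [negerrorLoop_cons_neg p pos rest acc _ hpop]
        rw [ih _ (fun pr hpr' => hsub pr (List.mem_cons_of_mem _ hpr'))]
        rw [List.filterMap_cons]
        simp only [reduceIte]
        rw [List.flatMap_cons, hchild, pvDfs_eq (p.eraseIdx k), IH _ hlen]
        simp [List.append_assoc]
      · rw [negerrorLoop_cons_other p pos elem rest acc hne]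
        rw [ih _ (fun pr hpr' => hsub pr (List.mem_cons_of_mem _ hpr'))]
        rw [List.filterMap_cons]
        simp [hne]

theorem negerror_eq_dfs (p : List String) : negerror p = (childrenB p).flatMap pvDfs := by
  generalize hL : p.length = L
  induction L using Nat.strong_induction_on generalizing p with
  | _ L IH =>
    rw [negerror]
    rw [negerrorLoop_eq p (fun q hq => IH q.length (by omega) q rfl)
      (PySem.List.enumerate p) [] (fun pr hpr => hpr)]
    rw [List.nil_append]
    rfl

-- ===== VERDICT (by name: the statement is the Claim_ definition above) =====
theorem negerror_spec : Claim_equal_negerror := by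
  intro p _
  unfold Spec_negerror negerror_alt
  rw [negerror_eq_dfs, negerrorStack_eq, List.nil_append]
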